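-- pv_equiv track=rewrite | github.com/ci5437-ene-mar-2018/proyecto-3-liay | proyecto-3/dnf-rule.py | fillSlots
-- ===== SOURCE A (Python) =====
-- def fillSlots(rule, variableList):
-- 	totalVariables = [-x for x in variableList]
--
-- 	for var1 in rule:
-- 		for var2 in totalVariables:
-- 			if abs(var1) == abs(var2):
-- 				totalVariables.remove(var2)
-- 				break
--
-- 	finalRule = rule + totalVariables
--
-- 	return finalRule
-- ===== SOURCE B (Python) =====
-- def fillSlots(rule, variableList):
--     need = {}
--     for x in rule:
--         a = abs(x)
--         need[a] = need.get(a, 0) + 1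
--     kept = []
--     for x in variableList:
--         a = abs(x)
--         if need.get(a, 0) > 0:
--             need[a] -= 1
--         else:
--             kept.append(-x)
--     return rule + kept
-- ===== Notes on version B (the rewrite author's own statement) =====
-- stated objective: faster
-- what changed: Replaces A's nested scan-and-remove over totalVariables with a frequency table of abs values built from rule plus a single order-preserving pass over variableList.
import Mathlib
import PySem

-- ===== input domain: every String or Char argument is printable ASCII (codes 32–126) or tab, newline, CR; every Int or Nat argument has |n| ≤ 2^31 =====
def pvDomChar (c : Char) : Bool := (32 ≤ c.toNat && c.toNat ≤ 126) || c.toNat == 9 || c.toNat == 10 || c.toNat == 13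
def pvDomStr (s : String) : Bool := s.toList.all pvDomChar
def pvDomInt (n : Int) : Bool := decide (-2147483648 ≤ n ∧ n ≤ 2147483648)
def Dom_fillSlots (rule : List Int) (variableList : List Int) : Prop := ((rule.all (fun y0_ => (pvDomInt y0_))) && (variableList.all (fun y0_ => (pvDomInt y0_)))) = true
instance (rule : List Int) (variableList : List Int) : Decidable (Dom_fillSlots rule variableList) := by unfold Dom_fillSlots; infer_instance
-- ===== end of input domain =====

-- B replaces A's quadratic nested scan-and-remove with a frequency table of |·| values
-- built from `rule` plus one order-preserving pass over `variableList` (objective: faster).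

-- ===== PORT A =====
-- Inner `for var2 in totalVariables: if abs(var1)==abs(var2): totalVariables.remove(var2); break`:
-- the scan stops at the FIRST element whose abs matches, and `remove(var2)` deletes the first
-- occurrence of the value var2 — which is that element itself (an earlier equal element would
-- also have matched first). Ported as removing the first |·|-match while scanning.
def fillSlotsScan (var1 : Int) : List Int → List Int
  | [] => []
  | var2 :: rest => if |var1| == |var2| then rest else var2 :: fillSlotsScan var1 rest

def fillSlots (rule : List Int) (variableList : List Int) : List Int :=
  let totalVariables := variableList.map (fun x => -x)
  let totalVariables := rule.foldl (fun tv var1 => fillSlotsScan var1 tv) totalVariables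
  rule ++ totalVariables

-- ===== PORT B =====
def fillSlots_alt (rule : List Int) (variableList : List Int) : List Int :=
  let need : PySem.Dict Int Int :=
    rule.foldl (fun d x => d.insert |x| (d.getD |x| 0 + 1)) PySem.Dict.empty
  let st := variableList.foldl
    (fun (s : PySem.Dict Int Int × List Int) x =>
      if s.1.getD |x| 0 > 0 then (s.1.insert |x| (s.1.getD |x| 0 - 1), s.2)
      else (s.1, s.2 ++ [-x]))
    (need, [])
  rule ++ st.2

-- ===== PRECONDITION & SPEC =====
def Spec_fillSlots (rule : List Int) (variableList : List Int) (out : List Int) : Prop := out = fillSlots_alt rule variableList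
instance (rule : List Int) (variableList : List Int) (out : List Int) : Decidable (Spec_fillSlots rule variableList out) := by unfold Spec_fillSlots; infer_instance

-- ===== CLAIM (what is proved, stated in full; the proofs are below) =====
def Claim_equal_fillSlots : Prop := ∀ (rule : List Int) (variableList : List Int), Dom_fillSlots rule variableList → Spec_fillSlots rule variableList (fillSlots rule variableList)

-- ===== LEMMAS AND PROOFS =====

-- Proof-side model: drop the first (c |y|) elements of each abs-class, keep the rest in order.
def dropC (c : Int → Int) : List Int → List Int
  | [] => []
  | y :: ys =>
    if c |y| > 0 then dropC (fun k => if k = |y| then c k - 1 else c k) ys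
    else y :: dropC c ys

def incAt (a : Int) (c : Int → Int) : Int → Int := fun k => if k = a then c k + 1 else c k

theorem dropC_zero (tv : List Int) : dropC (fun _ => 0) tv = tv := by
  induction tv with
  | nil => rfl
  | cons y ys ih => simp [dropC, ih]

theorem dropC_scan (a : Int) (c : Int → Int) (hc : ∀ k, 0 ≤ c k) (tv : List Int) :
    dropC (incAt |a| c) tv = dropC c (fillSlotsScan a tv) := by
  induction tv generalizing c with
  | nil => rfl
  | cons y ys ih =>
    by_cases hy : |y| = |a|
    · have hpos : 0 < incAt |a| c |y| := by
        have := hc |a|; simp [incAt, hy]; omega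
      have hfun : (fun k => if k = |y| then incAt |a| c k - 1 else incAt |a| c k) = c := by
        funext k; simp [incAt, hy]; by_cases hk : k = |a| <;> simp [hk]
      rw [show fillSlotsScan a (y :: ys) = ys by simp [fillSlotsScan, hy]]
      rw [show dropC (incAt |a| c) (y :: ys)
            = dropC (fun k => if k = |y| then incAt |a| c k - 1 else incAt |a| c k) ys by
          simp only [dropC]; rw [if_pos hpos]]
      rw [hfun]
    · have hne : (|a| == |y|) = false := by simp; omega
      have hval : incAt |a| c |y| = c |y| := by simp [incAt]; intro h; omega
      by_cases hp : c |y| > 0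
      · have h1 : (fun k => if k = |y| then incAt |a| c k - 1 else incAt |a| c k)
            = incAt |a| (fun k => if k = |y| then c k - 1 else c k) := by
          funext k; simp [incAt]
          by_cases hk1 : k = |y| <;> by_cases hk2 : k = |a| <;> simp [hk1, hk2] <;> omega
        have h2 : ∀ k, 0 ≤ (fun k => if k = |y| then c k - 1 else c k) k := by
          intro k; by_cases hk : k = |y| <;> simp [hk] <;> [omega; exact hc k]
        simp only [dropC, fillSlotsScan, hne, hval, if_pos hp, h1]
        rw [ih _ h2]
        simp [dropC, hp]
      · simp only [dropC, fillSlotsScan, hne, hval, if_neg hp]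
        rw [ih _ hc]
        simp [dropC, hp]

def countAbs (rule : List Int) (k : Int) : Int := (rule.countP (fun x => |x| == k) : Nat)

theorem foldl_scan_eq_dropC (rule : List Int) (tv : List Int) :
    rule.foldl (fun tv var1 => fillSlotsScan var1 tv) tv = dropC (countAbs rule) tv := by
  induction rule generalizing tv with
  | nil =>
    have : countAbs [] = fun _ => 0 := by funext k; simp [countAbs]
    simp [this, dropC_zero]
  | cons a rs ih =>
    have hc : ∀ k, 0 ≤ countAbs rs k := fun k => Int.natCast_nonneg _
    have hkey : countAbs (a :: rs) = incAt |a| (countAbs rs) := by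
      funext k; unfold countAbs incAt
      rw [List.countP_cons]
      by_cases hk : k = |a|
      · simp [hk]
      · have hne : (|a| == k) = false := by simp; omega
        simp [hne, hk]
    rw [List.foldl_cons, ih, hkey, dropC_scan a _ hc]

theorem alt_loop_eq_dropC (vl : List Int) (d : PySem.Dict Int Int) (kept : List Int)
    (c : Int → Int) (hd : ∀ k, d.getD k 0 = c k) :
    (vl.foldl
      (fun (s : PySem.Dict Int Int × List Int) x =>
        if s.1.getD |x| 0 > 0 then (s.1.insert |x| (s.1.getD |x| 0 - 1), s.2)
        else (s.1, s.2 ++ [-x]))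
      (d, kept)).2 = kept ++ dropC c (vl.map (fun x => -x)) := by
  induction vl generalizing d kept c with
  | nil => simp [dropC]
  | cons x xs ih =>
    simp only [List.foldl_cons]
    by_cases hp : d.getD |x| 0 > 0
    · have hd' : ∀ k, (d.insert |x| (d.getD |x| 0 - 1)).getD k 0
          = (fun k => if k = |x| then c k - 1 else c k) k := by
        intro k; rw [PySem.Dict.getD_insert]; by_cases hk : k = |x| <;> simp [hk, hd]
      rw [if_pos hp]
      rw [ih _ _ _ hd']
      have hp2 : c |x| > 0 := by rw [← hd]; exact hp
      simp [dropC, abs_neg, hp2]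
    · rw [if_neg hp]
      rw [ih _ _ _ hd]
      have hp2 : ¬ c |x| > 0 := by rw [← hd]; exact hp
      simp [dropC, abs_neg, hp2]

theorem need_getD (rule : List Int) (k : Int) :
    (rule.foldl (fun d x => d.insert |x| (d.getD |x| 0 + 1)) PySem.Dict.empty).getD k 0
      = countAbs rule k := by
  have h := PySem.Dict.getD_foldl_insert_add_one (l := rule.map (fun x => |x|))
      (d := (PySem.Dict.empty : PySem.Dict Int Int)) (v := k)
  rw [List.foldl_map] at h
  rw [h]
  simp only [PySem.Dict.getD_empty, zero_add, countAbs]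
  rw [List.count_eq_countP, List.countP_map]
  rfl

-- ===== VERDICT (by name: the statement is the Claim_ definition above) =====
theorem fillSlots_spec : Claim_equal_fillSlots := by
  intro rule vl _
  unfold Spec_fillSlots fillSlots fillSlots_alt
  simp only
  rw [foldl_scan_eq_dropC, alt_loop_eq_dropC _ _ _ (countAbs rule) (need_getD rule)]
  simp
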